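-- pv_equiv track=rewrite | github.com/rubenverweij/ksandr-gpt | ksandr/helpers.py | extract_dso_variants
-- ===== SOURCE A (Python) =====
-- def extract_dso_variants(question, netbeheerders_dict):
--     """
--     Extracts all variants of netbeheerders (network managers) mentioned in the question.
--
--     Parameters:
--     question (str): The user's question or input text.
--     netbeheerders_dict (dict): Dictionary mapping netbeheerder names to lists of their variants.
--
--     Returns:
--     set: A set containing all matched variants (across all netbeheerders) found in the question.
--     """
--     question_lower = question.lower()
--     matched_variants = set()
--     for variants in netbeheerders_dict.values():
--         for variant in variants:
--             if variant.lower() in question_lower: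
--                 matched_variants.update(variants)
--                 break  # Eén match per netbeheerder is genoeg
--     return matched_variants
-- ===== SOURCE B (Python) =====
-- def extract_dso_variants(question, netbeheerders_dict):
--     """Two-phase rewrite: search the question once per DISTINCT lowered pattern,
--     then mark groups by set membership instead of repeated substring scans."""
--     q = question.lower()
--     groups = list(netbeheerders_dict.values())
--     patterns = {v.lower() for vs in groups for v in vs}
--     hits = {p for p in patterns if p in q}
--     matched = set()
--     for vs in groups:
--         if any(v.lower() in hits for v in vs):
--             matched.update(vs)
--     return matched
-- ===== Notes on version B (the rewrite author's own statement) =====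
-- stated objective: alternative
-- what changed: B restructures the per-group break-scan into two phases: it collects the set of DISTINCT lowered variants, searches the question once per distinct pattern to build a hit set, then marks each group by set membership and unions its variants — repeated substring searches for duplicated variants disappear.
import Mathlib
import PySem

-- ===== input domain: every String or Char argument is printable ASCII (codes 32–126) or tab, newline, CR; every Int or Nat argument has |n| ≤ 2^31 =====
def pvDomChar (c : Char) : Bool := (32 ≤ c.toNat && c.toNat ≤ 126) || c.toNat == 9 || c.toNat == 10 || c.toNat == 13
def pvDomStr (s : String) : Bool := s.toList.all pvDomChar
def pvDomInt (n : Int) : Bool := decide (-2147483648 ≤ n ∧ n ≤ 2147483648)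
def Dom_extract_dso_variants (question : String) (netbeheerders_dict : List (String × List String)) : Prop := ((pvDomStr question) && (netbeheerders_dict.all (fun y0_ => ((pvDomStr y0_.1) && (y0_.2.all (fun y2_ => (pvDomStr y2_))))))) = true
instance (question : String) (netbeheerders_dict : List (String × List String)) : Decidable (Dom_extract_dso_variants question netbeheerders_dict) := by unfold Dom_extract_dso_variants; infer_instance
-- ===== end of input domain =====

-- B replaces A's per-variant substring scans by one search per distinct lowered
-- pattern plus set-membership marking of groups; equivalence of the return value
-- (a Python set, modelled as PySem.Set) is proved on the whole domain.
-- ===== PORT A =====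
-- inner 'for variant in variants: … break' of A, carrying the full group 'orig' for the update
def pvLoopA (q : String) (orig : List String) : List String → PySem.Set String → PySem.Set String
  | [], acc => acc
  | v :: t, acc =>
      if PySem.Str.isIn (PySem.Str.lower v) q then PySem.Set.update acc orig
      else pvLoopA q orig t acc

def extract_dso_variants (question : String) (netbeheerders_dict : List (String × List String)) : List String :=
  let question_lower := PySem.Str.lower question
  (netbeheerders_dict.map Prod.snd).foldl
    (fun matched_variants variants => pvLoopA question_lower variants variants matched_variants)
    PySem.Set.empty

-- ===== PORT B =====
def extract_dso_variants_alt (question : String) (netbeheerders_dict : List (String × List String)) : List String :=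
  let q := PySem.Str.lower question
  let groups := netbeheerders_dict.map Prod.snd
  let patterns : PySem.Set String :=
    PySem.Set.ofList (groups.flatMap (fun vs => vs.map PySem.Str.lower))
  -- {p for p in patterns if p in q}: consumed only by membership tests below, order-safe
  let hits : PySem.Set String := patterns.filter (fun p => PySem.Str.isIn p q)
  groups.foldl
    (fun matched vs =>
      if vs.any (fun v => PySem.Set.contains hits (PySem.Str.lower v)) then PySem.Set.update matched vs
      else matched)
    PySem.Set.empty

-- ===== PRECONDITION & SPEC =====
def Spec_extract_dso_variants (question : String) (netbeheerders_dict : List (String × List String)) (out : List String) : Prop := out = extract_dso_variants_alt question netbeheerders_dict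
instance (question : String) (netbeheerders_dict : List (String × List String)) (out : List String) : Decidable (Spec_extract_dso_variants question netbeheerders_dict out) := by unfold Spec_extract_dso_variants; infer_instance

-- ===== CLAIM (what is proved, stated in full; the proofs are below) =====
def Claim_equal_extract_dso_variants : Prop := ∀ (question : String) (netbeheerders_dict : List (String × List String)), Dom_extract_dso_variants question netbeheerders_dict → Spec_extract_dso_variants question netbeheerders_dict (extract_dso_variants question netbeheerders_dict)

-- ===== LEMMAS AND PROOFS =====

-- ===== VERDICT (by name: the statement is the Claim_ definition above) =====
-- Bool-valued any respects pointwise equality on members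
theorem pv_any_congr {l : List String} {p q : String → Bool} (h : ∀ x ∈ l, p x = q x) :
    l.any p = l.any q := by
  induction l with
  | nil => rfl
  | cons a t ih =>
      simp only [List.any_cons, h a (by simp), ih (fun x hx => h x (by simp [hx]))]

-- A's inner loop is 'update iff some variant matches'
theorem pvLoopA_eq (q : String) (orig : List String) (vs : List String) (acc : PySem.Set String) :
    pvLoopA q orig vs acc =
      if vs.any (fun v => PySem.Str.isIn (PySem.Str.lower v) q) then PySem.Set.update acc orig
      else acc := by
  induction vs with
  | nil => simp [pvLoopA]
  | cons v t ih =>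
      simp only [pvLoopA, ih, List.any_cons]
      by_cases h : PySem.Chars.isIn (PySem.Chars.lower v.toList) q.toList = true
      · simp [h]
      · simp [h]

-- membership in the filtered pattern set decides exactly 'pattern occurs in q'
theorem pv_filter_contains (q : String) (pats : List String) (p : String) (hp : p ∈ pats) :
    PySem.Set.contains (pats.filter (fun r => PySem.Str.isIn r q)) p = PySem.Str.isIn p q := by
  by_cases hq : PySem.Chars.isIn p.toList q.toList = true
  · simp [PySem.Set.contains, List.mem_filter, hp, hq]
  · simp [PySem.Set.contains, List.mem_filter, hq]

theorem extract_dso_variants_spec : Claim_equal_extract_dso_variants := by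
  intro question d _
  unfold Spec_extract_dso_variants extract_dso_variants extract_dso_variants_alt
  simp only []
  apply PySem.List.foldl_congr_mem
  intro acc vs hvs
  rw [pvLoopA_eq]
  have hmem : ∀ v ∈ vs, (PySem.Str.isIn (PySem.Str.lower v) (PySem.Str.lower question) : Bool)
      = PySem.Set.contains
          ((PySem.Set.ofList ((d.map Prod.snd).flatMap (fun vs => vs.map PySem.Str.lower))).filter
            (fun p => PySem.Str.isIn p (PySem.Str.lower question)))
          (PySem.Str.lower v) := by
    intro v hv
    refine (pv_filter_contains _ _ _ ?_).symm
    rw [PySem.Set.mem_ofList]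
    exact List.mem_flatMap.mpr ⟨vs, hvs, List.mem_map.mpr ⟨v, hv, rfl⟩⟩
  rw [pv_any_congr hmem]
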